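-- pv_equiv track=rewrite | github.com/Echo0117/NLP | data_processing/pos_tagging_preprocessing.py | get_pos_idx
-- ===== SOURCE A (Python) =====
-- def get_pos_idx(pos):
--     pos_to_id = {}
--     id_to_pos = {}
--     for sentence in pos:
--         for p in sentence:
--             if p not in pos_to_id:
--                 index = len(pos_to_id)
--                 pos_to_id[p] = index
--                 id_to_pos[index] = p
--     return pos_to_id, id_to_pos
-- ===== SOURCE B (Python) =====
-- def get_pos_idx(pos):
--     flat = [p for sentence in pos for p in sentence]
--     uniq = sorted(set(flat), key=flat.index)
--     pos_to_id = {p: i for i, p in enumerate(uniq)}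
--     id_to_pos = dict(enumerate(uniq))
--     return pos_to_id, id_to_pos
-- ===== Notes on version B (the rewrite author's own statement) =====
-- stated objective: alternative
-- what changed: Replaces A's incremental single pass that grows both dicts under a membership guard by a sort-based vocabulary construction: flatten, take the set of tags, sort it by first-occurrence position (flat.index), then build each map by an independent enumerate pass; correct because first-occurrence positions are distinct, so sorting by them recovers exactly A's insertion order.
import Mathlib
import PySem

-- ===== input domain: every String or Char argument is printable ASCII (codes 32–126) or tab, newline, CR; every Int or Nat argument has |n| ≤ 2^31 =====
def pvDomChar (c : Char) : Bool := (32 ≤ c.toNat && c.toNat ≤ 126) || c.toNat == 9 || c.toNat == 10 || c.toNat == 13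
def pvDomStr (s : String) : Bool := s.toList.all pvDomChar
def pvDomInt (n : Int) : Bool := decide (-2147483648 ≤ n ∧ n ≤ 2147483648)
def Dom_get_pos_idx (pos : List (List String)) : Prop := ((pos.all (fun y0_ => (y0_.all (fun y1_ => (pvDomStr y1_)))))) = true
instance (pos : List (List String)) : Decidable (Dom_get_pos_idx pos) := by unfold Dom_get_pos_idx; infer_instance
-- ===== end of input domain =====

-- B replaces A's incremental guarded single pass by a sort-based vocabulary build:
-- flatten, take the tag set, sort it by first-occurrence position, then two enumerate
-- passes; objective: alternative (same results, different algorithm).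


-- ===== PORT A =====
-- dicts are ported as association lists (insertion order); A only ever inserts FRESH
-- keys (guarded by 'p not in pos_to_id'), so 'pos_to_id[p] = index' appends (exact).
def get_pos_idx_step (st : (List (String × Int)) × (List (Int × String))) (p : String) :
    (List (String × Int)) × (List (Int × String)) :=
  if (st.1.map Prod.fst).contains p then st
  else
    let index : Int := st.1.length
    (st.1 ++ [(p, index)], st.2 ++ [(index, p)])

def get_pos_idx (pos : List (List String)) : (List (String × Int)) × (List (Int × String)) :=
  pos.foldl (fun st sentence => sentence.foldl get_pos_idx_step st) ([], [])

-- ===== PORT B =====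
-- set(flat) = PySem.Set.ofList flat; sorted(..., key=flat.index) = PySem.List.sorted with
-- key p = flat.index(p); 'flat.index' is PySem.List.index?, total on members of flat (every
-- element of set(flat) is one), so '.getD 0' is exact here. dict(enumerate(uniq)) and the
-- dict comprehension have distinct keys, so their item lists are the enumerate pairs in order.
def get_pos_idx_alt (pos : List (List String)) : (List (String × Int)) × (List (Int × String)) :=
  let flat := pos.flatMap (fun sentence => sentence)
  let uniq := PySem.List.sorted (PySem.Set.ofList flat)
      (fun p => (PySem.List.index? flat p).getD 0)
  let pos_to_id := (PySem.List.enumerate uniq).map (fun ip => (ip.2, ip.1))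
  let id_to_pos := PySem.List.enumerate uniq
  (pos_to_id, id_to_pos)

-- ===== PRECONDITION & SPEC =====
def Spec_get_pos_idx (pos : List (List String)) (out : (List (String × Int)) × (List (Int × String))) : Prop := out = get_pos_idx_alt pos
instance (pos : List (List String)) (out : (List (String × Int)) × (List (Int × String))) : Decidable (Spec_get_pos_idx pos out) := by unfold Spec_get_pos_idx; infer_instance

-- ===== CLAIM (what is proved, stated in full; the proofs are below) =====
def Claim_equal_get_pos_idx : Prop := ∀ (pos : List (List String)), Dom_get_pos_idx pos → Spec_get_pos_idx pos (get_pos_idx pos)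

-- ===== LEMMAS AND PROOFS =====

-- A's state after having seen exactly the distinct tags s (in order)
def pvStateOf (s : List String) : (List (String × Int)) × (List (Int × String)) :=
  ((PySem.List.enumerate s).map (fun ip => (ip.2, ip.1)), PySem.List.enumerate s)

theorem pvStep_stateOf (s : List String) (p : String) :
    get_pos_idx_step (pvStateOf s) p = pvStateOf (PySem.Set.add s p) := by
  have hkeys : ((pvStateOf s).1.map Prod.fst) = s := by
    simp [pvStateOf, List.map_map, Function.comp_def, PySem.List.map_snd_enumerate]
  have hlen : (pvStateOf s).1.length = s.length := by
    simp [pvStateOf, PySem.List.length_enumerate]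
  by_cases h : p ∈ s
  · simp [get_pos_idx_step, hkeys, h, PySem.Set.add]
  · simp only [get_pos_idx_step, hkeys, List.contains_eq_mem, decide_eq_true_eq, h, if_false,
      PySem.Set.add, PySem.Set.contains_eq_listContains, hlen]
    simp [pvStateOf, PySem.List.enumerate_append, PySem.List.enumerate]

theorem pvFold_stateOf (ts : List String) (s : List String) :
    ts.foldl get_pos_idx_step (pvStateOf s) = pvStateOf (ts.foldl PySem.Set.add s) := by
  induction ts generalizing s with
  | nil => rfl
  | cons t ts ih => simp [List.foldl_cons, pvStep_stateOf, ih]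

theorem pvNested_eq_flat (pos : List (List String)) (st : (List (String × Int)) × (List (Int × String))) :
    pos.foldl (fun st sentence => sentence.foldl get_pos_idx_step st) st
      = (pos.flatMap (fun sentence => sentence)).foldl get_pos_idx_step st := by
  induction pos generalizing st with
  | nil => rfl
  | cons sen rest ih => simp [List.flatMap_cons, List.foldl_append, ih]

-- foldl Set.add from any accumulator = accumulator ++ the fresh part of set(xs)
theorem pvFoldAdd (xs : List String) (s : List String) :
    xs.foldl PySem.Set.add s = s ++ (PySem.Set.ofList xs).filter (fun y => !s.contains y) := by
  induction xs generalizing s with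
  | nil => simp [PySem.Set.ofList]
  | cons x xs ih =>
    have hD : PySem.Set.ofList (x :: xs) = x :: (PySem.Set.ofList xs).filter (fun y => y != x) := by
      have : PySem.Set.ofList (x :: xs) = xs.foldl PySem.Set.add [x] := by
        simp [PySem.Set.ofList, PySem.Set.add, PySem.Set.empty]
      rw [this, ih]
      simp [bne, beq_eq_decide]
    rw [List.foldl_cons, ih, hD]
    by_cases hx : x ∈ s
    · have hadd : PySem.Set.add s x = s := by
        simp [PySem.Set.add, PySem.Set.contains_eq_listContains, hx]
      rw [hadd]
      congr 1
      rw [List.filter_cons]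
      simp only [List.contains_eq_mem, hx, decide_true, Bool.not_true,
        List.filter_filter]
      apply List.filter_congr
      intro y _
      by_cases hyx : y = x
      · subst hyx; simp [hx]
      · simp [hyx]
    · have hadd : PySem.Set.add s x = s ++ [x] := by
        simp [PySem.Set.add, PySem.Set.contains_eq_listContains, hx]
      rw [hadd]
      rw [List.filter_cons]
      simp only [List.contains_eq_mem, hx, decide_false, Bool.not_false, if_true,
        List.append_assoc, List.singleton_append, List.filter_filter]
      congr 2
      apply List.filter_congr
      intro y _
      by_cases hyx : y = x
      · subst hyx; simp [hx]
      · simp [hyx, List.mem_append]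

theorem pvOfList_cons (x : String) (xs : List String) :
    PySem.Set.ofList (x :: xs) = x :: (PySem.Set.ofList xs).filter (fun y => y != x) := by
  have : PySem.Set.ofList (x :: xs) = xs.foldl PySem.Set.add [x] := by
    simp [PySem.Set.ofList, PySem.Set.add, PySem.Set.empty]
  rw [this, pvFoldAdd]
  simp [bne, beq_eq_decide]

-- first-occurrence positions strictly increase along set(xs)
theorem pvPairwiseIdx (xs : List String) :
    (PySem.Set.ofList xs).Pairwise
      (fun a b => (PySem.List.index? xs a).getD 0 < (PySem.List.index? xs b).getD 0) := by
  induction xs with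
  | nil => simp [PySem.Set.ofList, PySem.Set.empty]
  | cons x xs ih =>
    rw [pvOfList_cons]
    constructor
    · intro b hb
      have hbne : b ≠ x := by
        have := List.of_mem_filter hb
        simpa using this
      have hbmem : b ∈ xs := by
        have := (PySem.Set.mem_ofList xs b).mp (List.mem_of_mem_filter hb)
        exact this
      obtain ⟨k, hk⟩ := Option.isSome_iff_exists.mp
        ((PySem.List.index?_isSome_iff xs b).mpr hbmem)
      rw [PySem.List.index?_cons_self, PySem.List.index?_cons_of_ne xs (Ne.symm hbne), hk]
      simp
    · have := List.Pairwise.filter (R := fun a b =>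
        (PySem.List.index? xs a).getD 0 < (PySem.List.index? xs b).getD 0)
        (fun y => y != x) ih
      refine this.imp_of_mem ?_
      intro a b ha hb hab
      have hane : a ≠ x := by simpa using List.of_mem_filter ha
      have hbne : b ≠ x := by simpa using List.of_mem_filter hb
      have hamem : a ∈ xs := (PySem.Set.mem_ofList xs a).mp (List.mem_of_mem_filter ha)
      have hbmem : b ∈ xs := (PySem.Set.mem_ofList xs b).mp (List.mem_of_mem_filter hb)
      obtain ⟨j, hj⟩ := Option.isSome_iff_exists.mp
        ((PySem.List.index?_isSome_iff xs a).mpr hamem)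
      obtain ⟨k, hk⟩ := Option.isSome_iff_exists.mp
        ((PySem.List.index?_isSome_iff xs b).mpr hbmem)
      rw [PySem.List.index?_cons_of_ne xs (Ne.symm hane),
        PySem.List.index?_cons_of_ne xs (Ne.symm hbne), hj, hk]
      rw [hj, hk] at hab
      simpa using hab

-- the sort by first occurrence returns set(flat) unchanged
theorem pvSorted_ofList (flat : List String) :
    PySem.List.sorted (PySem.Set.ofList flat)
      (fun p => (PySem.List.index? flat p).getD 0) = PySem.Set.ofList flat :=
  PySem.List.sorted_eq_of_perm_of_pairwise_lt _ _ _ (List.Perm.refl _) (pvPairwiseIdx flat)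

-- ===== VERDICT (by name: the statement is the Claim_ definition above) =====
theorem get_pos_idx_spec : Claim_equal_get_pos_idx := by
  intro pos _
  show get_pos_idx pos = get_pos_idx_alt pos
  have h0 : (([], []) : (List (String × Int)) × (List (Int × String))) = pvStateOf [] := rfl
  rw [get_pos_idx, pvNested_eq_flat, h0, pvFold_stateOf]
  have : (pos.flatMap (fun sentence => sentence)).foldl PySem.Set.add []
      = PySem.Set.ofList (pos.flatMap (fun sentence => sentence)) := rfl
  rw [this, get_pos_idx_alt, pvSorted_ofList]
  rfl
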